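-- pv_equiv track=rewrite | github.com/candyer/leetcode | numUniqueEmails.py | final_address
-- ===== SOURCE A (Python) =====
-- def final_address(email):
-- 	local, domain = email.split('@')
-- 	tmp = []
-- 	for c in local:
-- 		if c == '+':
-- 			break
-- 		if c != '.':
-- 			tmp.append(c)
-- 	return ''.join(tmp) + '@' + domain
-- ===== SOURCE B (Python) =====
-- def final_address(email):
--     local, domain = email.split('@')
--     return local.split('+')[0].replace('.', '') + '@' + domain
-- ===== Notes on version B (the rewrite author's own statement) =====
-- stated objective: idiomatic
-- what changed: The char-by-char accumulating loop with an early break is replaced by a cut-then-strip pipeline of library calls: split('+')[0] cuts everything at the first '+', then replace('.', '') removes dots.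
import Mathlib
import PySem

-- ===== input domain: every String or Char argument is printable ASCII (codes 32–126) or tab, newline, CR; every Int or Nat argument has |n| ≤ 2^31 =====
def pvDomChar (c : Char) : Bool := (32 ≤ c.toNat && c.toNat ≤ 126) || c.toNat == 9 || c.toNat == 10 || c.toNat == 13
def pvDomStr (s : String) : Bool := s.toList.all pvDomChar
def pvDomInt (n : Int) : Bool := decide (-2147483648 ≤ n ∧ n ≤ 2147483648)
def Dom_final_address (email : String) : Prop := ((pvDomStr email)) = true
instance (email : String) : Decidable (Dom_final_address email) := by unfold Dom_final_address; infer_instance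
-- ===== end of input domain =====

-- B is the idiomatic cut-then-strip form (split('+')[0].replace('.','')); equal return value on every input with exactly one '@'.

-- ===== PORT A =====
-- the 'for c in local: if c == '+': break; if c != '.': tmp.append(c)' loop
def finalLoop : List Char → List Char → List Char
  | [], tmp => tmp
  | c :: rest, tmp =>
      if c = '+' then tmp
      else if c ≠ '.' then finalLoop rest (tmp ++ [c])
      else finalLoop rest tmp

def final_address (email : String) : String :=
  match PySem.Str.split? email "@" with
  | some [locl, domain] =>
      let tmp := finalLoop locl.toList []
      String.ofList (tmp ++ '@' :: domain.toList)
  | _ => ""   -- Python raises ValueError here (unpacking); excluded by Pre_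

-- ===== PORT B =====
def final_address_alt (email : String) : String :=
  -- sep "@" is nonempty, so split? is never none and getD [] is never taken;
  -- the two-variable unpack is the length-2 guard (Python raises ValueError otherwise; excluded by Pre_)
  let parts := (PySem.Str.split? email "@").getD []
  if parts.length = 2 then
    let locl := parts.headD ""
    let domain := (parts.getLast?).getD ""
    let cut := ((PySem.Str.split? locl "+").getD []).headD ""
    let stripped := PySem.Str.replace cut "." ""
    String.ofList (stripped.toList ++ '@' :: domain.toList)
  else ""

-- ===== PRECONDITION & SPEC =====
-- Pre_ excludes exactly the inputs with no '@' or more than one '@', on which A's two-variable unpacking raises ValueError.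
def Pre_final_address (email : String) : Prop := PySem.Str.count email "@" = 1
instance (email : String) : Decidable (Pre_final_address email) := by unfold Pre_final_address; infer_instance
def pvWitness_final_address : String := "a.b+c@x.com"

def Spec_final_address (email : String) (out : String) : Prop := out = final_address_alt email
instance (email : String) (out : String) : Decidable (Spec_final_address email out) := by unfold Spec_final_address; infer_instance

-- ===== CLAIM (what is proved, stated in full; the proofs are below) =====
def Claim_equal_final_address : Prop := ∀ (email : String), Dom_final_address email → Pre_final_address email → Spec_final_address email (final_address email)

-- ===== LEMMAS AND PROOFS =====

-- A's loop appends the non-dot chars before the first '+'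
theorem finalLoop_eq (l tmp : List Char) :
    finalLoop l tmp = tmp ++ (l.takeWhile (· ≠ '+')).filter (· ≠ '.') := by
  induction l generalizing tmp with
  | nil => simp [finalLoop]
  | cons c rest ih =>
    by_cases h : c = '+'
    · subst h; simp [finalLoop, List.takeWhile]
    · by_cases hd : c = '.'
      · subst hd; simp [finalLoop, List.takeWhile, ih]
      · simp [finalLoop, h, hd, List.takeWhile, ih]

-- splitOn.go: a pending accumulator factors out
theorem splitOn_go_acc (sep : List Char) (fuel : Nat) :
    ∀ (l cur : List Char) (out : List (List Char)),
      PySem.Chars.splitOn.go sep fuel l cur out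
        = out.reverse ++ PySem.Chars.splitOn.go sep fuel l cur [] := by
  induction fuel with
  | zero => intro l cur out; simp [PySem.Chars.splitOn.go]
  | succ f ih =>
    intro l cur out
    cases l with
    | nil => simp [PySem.Chars.splitOn.go]
    | cons c rest =>
      by_cases hp : sep.isPrefixOf (c :: rest) = true
      · simp only [PySem.Chars.splitOn.go, hp, if_pos]
        rw [ih _ _ (cur.reverse :: out), ih _ _ [cur.reverse]]
        simp
      · simp only [PySem.Chars.splitOn.go, hp, if_neg, Bool.false_eq_true, not_false_iff]
        exact ih _ _ out

-- the first piece of split('+') is takeWhile (· ≠ '+')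
theorem splitOn_go_head (l : List Char) :
    ∀ (fuel : Nat) (cur : List Char), l.length < fuel →
      ∃ tail, PySem.Chars.splitOn.go ['+'] fuel l cur []
        = (cur.reverse ++ l.takeWhile (· ≠ '+')) :: tail := by
  induction l with
  | nil =>
    intro fuel cur h
    cases fuel with
    | zero => omega
    | succ f => exact ⟨[], by simp [PySem.Chars.splitOn.go]⟩
  | cons c rest ih =>
    intro fuel cur h
    cases fuel with
    | zero => omega
    | succ f =>
      by_cases hc : c = '+'
      · subst hc
        refine ⟨PySem.Chars.splitOn.go ['+'] f rest [] [], ?_⟩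
        simp only [PySem.Chars.splitOn.go, List.isPrefixOf, BEq.rfl, Bool.true_and,
          if_pos]
        simp only [List.length_cons, List.length_nil, List.drop_succ_cons, List.drop_zero]
        rw [splitOn_go_acc ['+'] f rest [] [cur.reverse]]
        simp [List.takeWhile]
      · have hp : (['+']).isPrefixOf (c :: rest) = false := by
          simp [List.isPrefixOf]; exact fun h' => hc h'.symm
        obtain ⟨tail, ht⟩ := ih f (c :: cur) (by simpa using h)
        refine ⟨tail, ?_⟩
        simp only [PySem.Chars.splitOn.go, hp, Bool.false_eq_true, if_neg, not_false_iff]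
        rw [ht]
        simp [List.takeWhile, hc]

-- replace '.' by '' is filter (· ≠ '.')
theorem replace_go_dot (l : List Char) :
    ∀ (fuel : Nat) (acc : List Char), l.length ≤ fuel →
      PySem.Chars.replace.go ['.'] [] fuel l acc
        = acc.reverse ++ l.filter (· ≠ '.') := by
  induction l with
  | nil =>
    intro fuel acc h
    cases fuel <;> simp [PySem.Chars.replace.go]
  | cons c rest ih =>
    intro fuel acc h
    cases fuel with
    | zero => simp at h
    | succ f =>
      by_cases hc : c = '.'
      · subst hc
        simp only [PySem.Chars.replace.go, List.isPrefixOf, BEq.rfl, Bool.true_and,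
          if_pos]
        simp only [List.length_cons, List.length_nil, List.drop_succ_cons, List.drop_zero,
          List.reverse_nil, List.nil_append]
        rw [ih f acc (by simpa using h)]
        simp [List.filter]
      · have hp : (['.']).isPrefixOf (c :: rest) = false := by
          simp [List.isPrefixOf]; exact fun h' => hc h'.symm
        simp only [PySem.Chars.replace.go, hp, Bool.false_eq_true, if_neg, not_false_iff]
        rw [ih f (c :: acc) (by simpa using h)]
        simp [List.filter, hc]

theorem replace_dot (l : List Char) :
    PySem.Chars.replace l ['.'] [] = l.filter (· ≠ '.') := by
  simp only [PySem.Chars.replace]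
  rw [if_neg (by simp)]
  simpa using replace_go_dot l l.length [] (le_refl _)

-- the two local-part computations agree
theorem local_eq (locl : String) :
    (PySem.Str.replace (((PySem.Str.split? locl "+").getD []).headD "") "." "").toList
      = finalLoop locl.toList [] := by
  rw [finalLoop_eq, PySem.Str.toList_replace]
  simp only [PySem.Str.split?, PySem.Chars.split?]
  rw [if_neg (by simp)]
  simp only [show "+".toList = ['+'] from rfl, show ".".toList = ['.'] from rfl,
    show "".toList = ([] : List Char) from rfl]
  obtain ⟨tail, ht⟩ := splitOn_go_head locl.toList (locl.toList.length + 1) [] (by omega)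
  have hs : PySem.Chars.splitOn locl.toList ['+']
      = (locl.toList.takeWhile (· ≠ '+')) :: tail := by
    simpa [PySem.Chars.splitOn] using ht
  rw [hs]
  simp only [Option.map_some, Option.getD_some, List.map_cons, List.headD_cons,
    String.toList_ofList]
  rw [replace_dot]
  simp

-- ===== VERDICT (by name: the statement is the Claim_ definition above) =====
theorem final_address_spec : Claim_equal_final_address := by
  intro email _ _
  unfold Spec_final_address final_address final_address_alt
  cases h : PySem.Str.split? email "@" with
  | none => rfl
  | some parts =>
    match parts with
    | [] => rfl
    | [_] => rfl
    | locl :: domain :: _ :: _ => rfl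
    | [locl, domain] =>
      simp only [Option.getD_some, List.length_cons, List.length_nil, List.headD_cons,
        List.getLast?_cons_cons, List.getLast?_singleton, if_pos]
      rw [local_eq]
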